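-- pv_equiv track=rewrite | github.com/sophiegiraudo/CITS1401-Project-2 | Project_2_22838134.py | conjunctions
-- ===== SOURCE A (Python) =====
-- def conjunctions(file):
--     """
--     Returns the dictionary of the count of all conjunctions in a file.
--     """
--
--     conjunction_words = {"also":0, "although":0, "and":0, "as":0, "because":0,
--               "before":0, "but":0, "for":0, "if":0, "nor":0, "of":0, "or":0,
--               "since":0, "that":0, "thought":0,"until":0, "when":0,
--               "whenever":0, "whereas":0, "which":0, "while":0, "yet":0}
--
--     words = conjunctions_file(file)
--
--     for word in words:
--         if word in conjunction_words:
--             conjunction_words[word] = conjunction_words.get(word, 0) + 1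
--
--     return conjunction_words
--
-- def conjunctions_file(file):
--     """
--     Returns a list of all words in a file excluding all punctuation.
--     """
--
--     file_list = []
--     words = []
--     punctuation = "!@#$%^&*()_=+`~[]{}|\"';:<,>.?/\\"
--
--     file = file.replace("--", " ").replace("\n", " ")
--
--     for mark in punctuation:
--         file = file.replace(mark, "")
--
--     file_list.append(file.split(" "))
--
--     for word in file_list[0]:
--         if word:
--             words.append(word.lower())
--
--     return words
-- ===== SOURCE B (Python) =====
-- CONJUNCTION_WORDS = ("also", "although", "and", "as", "because",
--                      "before", "but", "for", "if", "nor", "of", "or",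
--                      "since", "that", "thought", "until", "when",
--                      "whenever", "whereas", "which", "while", "yet")
--
-- def conjunctions_file(file):
--     """
--     Returns a list of all words in a file excluding all punctuation.
--     """
--     file_list = []
--     words = []
--     punctuation = "!@#$%^&*()_=+`~[]{}|\"';:<,>.?/\\"
--     file = file.replace("--", " ").replace("\n", " ")
--     for mark in punctuation:
--         file = file.replace(mark, "")
--     file_list.append(file.split(" "))
--     for word in file_list[0]:
--         if word:
--             words.append(word.lower())
--     return words
--
-- def conjunctions(file):
--     """
--     Returns the dictionary of the count of all conjunctions in a file.
--     """
--     # Build a full frequency table of EVERY token (no membership test),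
--     # then assemble the result from the fixed key list by table lookup.
--     freq = {}
--     for word in conjunctions_file(file):
--         freq[word] = freq.get(word, 0) + 1
--     return {key: freq.get(key, 0) for key in CONJUNCTION_WORDS}
-- ===== Notes on version B (the rewrite author's own statement) =====
-- stated objective: alternative
-- what changed: A tallies only conjunction keys by a membership test into the pre-zeroed fixed dict it then returns; B instead builds an unconditional full frequency table of every token in one pass and then constructs a fresh result dict by iterating the fixed 22-key list and looking each key up in the table (0 if absent).
import Mathlib
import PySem

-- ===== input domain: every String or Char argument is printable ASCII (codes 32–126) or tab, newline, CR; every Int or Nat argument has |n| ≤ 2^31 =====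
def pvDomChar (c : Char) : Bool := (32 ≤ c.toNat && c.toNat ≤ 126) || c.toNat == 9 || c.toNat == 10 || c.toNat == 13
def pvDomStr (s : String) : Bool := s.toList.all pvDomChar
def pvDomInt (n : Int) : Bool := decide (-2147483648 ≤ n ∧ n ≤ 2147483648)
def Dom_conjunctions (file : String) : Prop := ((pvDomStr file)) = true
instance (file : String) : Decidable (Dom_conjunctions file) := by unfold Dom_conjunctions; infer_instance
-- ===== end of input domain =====

-- B replaces A's membership-filtered tally into the pre-zeroed fixed dict by a full frequency table of all tokens followed by a lookup pass over the fixed key list (alternative decomposition; same tokenizer).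


-- ===== PORT A =====
-- shared helper conjunctions_file (identical in Source A and Source B)
def conjunctions_file (file : String) : List String :=
  let punctuation : String := "!@#$%^&*()_=+`~[]{}|\"';:<,>.?/\\"
  let file := PySem.Str.replace (PySem.Str.replace file "--" " ") "\n" " "
  let file := punctuation.toList.foldl (fun f mark => PySem.Str.replace f (String.ofList [mark]) "") file
  let fileList : List (List String) := [(PySem.Str.split? file " ").getD []]
  (fileList.headD []).foldl (fun ws w => if w ≠ "" then ws ++ [PySem.Str.lower w] else ws) []

def conjunctions (file : String) : List (String × Int) :=
  let d : PySem.Dict String Int := PySem.Dict.ofList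
    [("also",0), ("although",0), ("and",0), ("as",0), ("because",0),
     ("before",0), ("but",0), ("for",0), ("if",0), ("nor",0), ("of",0), ("or",0),
     ("since",0), ("that",0), ("thought",0), ("until",0), ("when",0),
     ("whenever",0), ("whereas",0), ("which",0), ("while",0), ("yet",0)]
  let words := conjunctions_file file
  let d := words.foldl (fun d w => if d.contains w then d.insert w (d.getD w 0 + 1) else d) d
  d.items

-- ===== PORT B =====
def conjKeys : List String :=
  ["also", "although", "and", "as", "because",
   "before", "but", "for", "if", "nor", "of", "or",
   "since", "that", "thought", "until", "when",
   "whenever", "whereas", "which", "while", "yet"]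

def conjunctions_alt (file : String) : List (String × Int) :=
  let freq : PySem.Dict String Int :=
    (conjunctions_file file).foldl (fun d w => d.insert w (d.getD w 0 + 1)) PySem.Dict.empty
  conjKeys.map (fun k => (k, freq.getD k 0))

-- ===== PRECONDITION & SPEC =====
def Spec_conjunctions (file : String) (out : List (String × Int)) : Prop := out = conjunctions_alt file
instance (file : String) (out : List (String × Int)) : Decidable (Spec_conjunctions file out) := by unfold Spec_conjunctions; infer_instance

-- ===== CLAIM (what is proved, stated in full; the proofs are below) =====
def Claim_equal_conjunctions : Prop := ∀ (file : String), Dom_conjunctions file → Spec_conjunctions file (conjunctions file)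

-- ===== LEMMAS AND PROOFS =====

theorem pv_loop_keys (words : List String) (d : PySem.Dict String Int) :
    (words.foldl (fun d w => if d.contains w then d.insert w (d.getD w 0 + 1) else d) d).keys
      = d.keys := by
  induction words generalizing d with
  | nil => rfl
  | cons w ws ih =>
      simp only [List.foldl_cons]
      by_cases h : d.contains w
      · simp only [h, if_true, ih]
        exact PySem.Dict.keys_insert_of_contains _ _ h
      · simp [h, ih]

theorem pv_loop_getD (words : List String) (d : PySem.Dict String Int) (k : String)
    (hk : d.contains k = true) :
    (words.foldl (fun d w => if d.contains w then d.insert w (d.getD w 0 + 1) else d) d).getD k 0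
      = d.getD k 0 + words.count k := by
  induction words generalizing d with
  | nil => simp
  | cons w ws ih =>
      simp only [List.foldl_cons, List.count_cons]
      by_cases h : d.contains w
      · simp only [h, if_true]
        have hc : (d.insert w (d.getD w 0 + 1)).contains k = true := by
          simp [PySem.Dict.contains_insert, hk]
        rw [ih _ hc]
        by_cases hwk : w = k
        · subst hwk; simp [PySem.Dict.getD_insert_self]; ring
        · rw [PySem.Dict.getD_insert_of_ne _ _ _ (fun h' => hwk h'.symm)]
          simp [hwk]
      · rw [if_neg h, ih _ hk]
        have hwk : ¬ (w = k) := fun h' => h (h' ▸ hk)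
        simp [hwk]

-- ===== VERDICT (by name: the statement is the Claim_ definition above) =====
set_option maxRecDepth 10000 in
theorem conjunctions_spec : Claim_equal_conjunctions := by
  intro file _
  simp only [Spec_conjunctions, conjunctions, conjunctions_alt]
  generalize conjunctions_file file = ws
  have hkeys : (PySem.Dict.ofList (ν := Int)
        [("also",0), ("although",0), ("and",0), ("as",0), ("because",0),
         ("before",0), ("but",0), ("for",0), ("if",0), ("nor",0), ("of",0), ("or",0),
         ("since",0), ("that",0), ("thought",0), ("until",0), ("when",0),
         ("whenever",0), ("whereas",0), ("which",0), ("while",0), ("yet",0)]).keys = conjKeys := by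
    decide
  have hinit : ∀ k ∈ conjKeys, (PySem.Dict.ofList (ν := Int)
        [("also",0), ("although",0), ("and",0), ("as",0), ("because",0),
         ("before",0), ("but",0), ("for",0), ("if",0), ("nor",0), ("of",0), ("or",0),
         ("since",0), ("that",0), ("thought",0), ("until",0), ("when",0),
         ("whenever",0), ("whereas",0), ("which",0), ("while",0), ("yet",0)]).contains k = true ∧
      (PySem.Dict.ofList (ν := Int)
        [("also",0), ("although",0), ("and",0), ("as",0), ("because",0),
         ("before",0), ("but",0), ("for",0), ("if",0), ("nor",0), ("of",0), ("or",0),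
         ("since",0), ("that",0), ("thought",0), ("until",0), ("when",0),
         ("whenever",0), ("whereas",0), ("which",0), ("while",0), ("yet",0)]).getD k 0 = 0 := by
    decide
  have hnodup : conjKeys.Nodup := by decide
  have hrk := pv_loop_keys ws (PySem.Dict.ofList
        [("also",0), ("although",0), ("and",0), ("as",0), ("because",0),
         ("before",0), ("but",0), ("for",0), ("if",0), ("nor",0), ("of",0), ("or",0),
         ("since",0), ("that",0), ("thought",0), ("until",0), ("when",0),
         ("whenever",0), ("whereas",0), ("which",0), ("while",0), ("yet",0)])
  rw [PySem.Dict.items_eq_map_keys _ (by rw [hrk, hkeys]; exact hnodup) 0, hrk, hkeys]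
  apply List.map_congr_left
  intro k hkmem
  rw [pv_loop_getD ws _ k (hinit k hkmem).1, (hinit k hkmem).2,
      PySem.Dict.foldl_insert_getD_add_one_eq_counter, PySem.Dict.getD_counter]
  simp
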